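-- pv_equiv track=rewrite | github.com/JulianNDENDE/Advent-of-code-2022 | src/day05.py | moveCratesRec
-- ===== SOURCE A (Python) =====
-- from typing import List
--
-- def moveCratesRec(
--     crates: List[List[str]], move: int, from_: int, to_: int
-- ) -> List[List[str]]:
--     if move == 0:
--         return crates
--     else:
--         if len(crates[from_]) == 0:
--             crates[from_].append(crates[to_].pop())
--         else:
--             crates[to_].append(crates[from_].pop())
--         crates = moveCratesRec(crates, move - 1, from_, to_)
--     return crates
-- ===== SOURCE B (Python) =====
-- from typing import List
--
-- def moveCratesRec(
--     crates: List[List[str]], move: int, from_: int, to_: int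
-- ) -> List[List[str]]:
--     src, dst = crates[from_], crates[to_]
--     if src is not dst:
--         k = min(move, len(src))
--         dst.extend(reversed(src[len(src) - k:]))
--         del src[len(src) - k:]
--         if (move - k) % 2 == 1:
--             src.append(dst.pop())
--     return crates
-- ===== Notes on version B (the rewrite author's own statement) =====
-- stated objective: faster
-- what changed: A moves one crate per recursive call; B computes the final state in closed form: it bulk-transfers min(move, len(src)) crates with one reversed slice, and resolves the remaining bounce steps (which just oscillate one crate) by the parity of move - k.
-- outside the precondition, e.g. on moveCratesRec([], 0, 0, 0): A returns [], B raises IndexError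
import Mathlib
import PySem

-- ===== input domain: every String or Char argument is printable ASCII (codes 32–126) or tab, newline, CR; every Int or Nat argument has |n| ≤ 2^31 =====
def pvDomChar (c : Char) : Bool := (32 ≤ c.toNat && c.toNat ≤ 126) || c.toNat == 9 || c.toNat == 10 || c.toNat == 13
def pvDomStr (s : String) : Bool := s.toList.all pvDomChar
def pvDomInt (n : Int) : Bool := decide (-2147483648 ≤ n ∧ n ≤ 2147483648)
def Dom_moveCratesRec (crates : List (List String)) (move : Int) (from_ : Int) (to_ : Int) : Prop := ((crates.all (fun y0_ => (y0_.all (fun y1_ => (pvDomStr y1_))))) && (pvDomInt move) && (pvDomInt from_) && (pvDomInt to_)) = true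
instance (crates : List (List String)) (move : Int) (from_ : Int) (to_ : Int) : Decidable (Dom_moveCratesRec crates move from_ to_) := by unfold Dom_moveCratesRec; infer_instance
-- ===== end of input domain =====

-- B replaces A's one-crate-at-a-time recursion by a closed-form bulk transfer (slice + parity of the
-- leftover bounce steps); equivalence is about the RETURN value (both Pythons also mutate the inner
-- lists of `crates` in place, in the same way).

-- ===== PORT A =====
-- fuel recursion on move.toNat; each level is one unfolding of A's Python body
def moveCratesRecGo (crates : List (List String)) (fuel : Nat) (from_ : Int) (to_ : Int) : List (List String) :=
  match fuel with
  | 0 => crates                                   -- if move == 0: return crates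
  | Nat.succ k =>
    let crates' :=
      if (PySem.List.pyGetD crates from_ []).length = 0 then
        -- crates[from_].append(crates[to_].pop())
        let t := PySem.List.pyGetD crates to_ []
        let c1 := PySem.List.pySetD crates to_ t.dropLast
        PySem.List.pySetD c1 from_ (PySem.List.pyGetD c1 from_ [] ++ [t.getLastD ""])
      else
        -- crates[to_].append(crates[from_].pop())
        let s := PySem.List.pyGetD crates from_ []
        let c1 := PySem.List.pySetD crates from_ s.dropLast
        PySem.List.pySetD c1 to_ (PySem.List.pyGetD c1 to_ [] ++ [s.getLastD ""])
    moveCratesRecGo crates' k from_ to_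

def moveCratesRec (crates : List (List String)) (move : Int) (from_ : Int) (to_ : Int) : List (List String) :=
  moveCratesRecGo crates move.toNat from_ to_

-- ===== PORT B =====
-- position a Python index i denotes in a list of length n (models B's `src is dst` object identity test)
def pvIdx (n : Nat) (i : Int) : Nat := if 0 ≤ i then i.toNat else n - (-i).toNat

def moveCratesRec_alt (crates : List (List String)) (move : Int) (from_ : Int) (to_ : Int) : List (List String) :=
  let src := PySem.List.pyGetD crates from_ []
  let dst := PySem.List.pyGetD crates to_ []
  if pvIdx crates.length from_ ≠ pvIdx crates.length to_ then      -- src is not dst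
    let k := min move (src.length : Int)
    let dst1 := dst ++ (PySem.List.slice src (some ((src.length : Int) - k)) none).reverse
    let src1 := PySem.List.slice src none (some ((src.length : Int) - k))
    let c1 := PySem.List.pySetD (PySem.List.pySetD crates to_ dst1) from_ src1
    if PySem.Int.mod (move - k) 2 = 1 then
      -- src.append(dst.pop())
      let c2 := PySem.List.pySetD c1 to_ dst1.dropLast
      PySem.List.pySetD c2 from_ (src1 ++ [dst1.getLastD ""])
    else c1
  else crates

-- ===== PRECONDITION & SPEC =====
-- Pre_ excludes exactly the inputs where one of the Pythons raises: out-of-range indices (B reads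
-- both stacks up front and raises IndexError even when move == 0, where A returns crates untouched),
-- negative move (A recurses forever: RecursionError on every such input), and positive moves from a
-- setup whose reachable stacks are all empty (pop from an empty list: IndexError in A).
def Pre_moveCratesRec (crates : List (List String)) (move : Int) (from_ : Int) (to_ : Int) : Prop :=
  PySem.Raise.InRange crates.length from_ ∧ PySem.Raise.InRange crates.length to_ ∧
  0 ≤ move ∧
  (0 < move →
    (if pvIdx crates.length from_ = pvIdx crates.length to_
     then PySem.List.pyGetD crates from_ ([] : List String) ≠ []
     else PySem.List.pyGetD crates from_ ([] : List String) ≠ [] ∨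
          PySem.List.pyGetD crates to_ ([] : List String) ≠ []))
instance (crates : List (List String)) (move : Int) (from_ : Int) (to_ : Int) : Decidable (Pre_moveCratesRec crates move from_ to_) := by unfold Pre_moveCratesRec; infer_instance

def pvWitness_moveCratesRec : List (List String) × Int × Int × Int := ([["a", "b"], []], 3, 0, 1)

def Spec_moveCratesRec (crates : List (List String)) (move : Int) (from_ : Int) (to_ : Int) (out : List (List String)) : Prop := out = moveCratesRec_alt crates move from_ to_
instance (crates : List (List String)) (move : Int) (from_ : Int) (to_ : Int) (out : List (List String)) : Decidable (Spec_moveCratesRec crates move from_ to_ out) := by unfold Spec_moveCratesRec; infer_instance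

-- ===== CLAIM (what is proved, stated in full; the proofs are below) =====
def Claim_equal_moveCratesRec : Prop := ∀ (crates : List (List String)) (move : Int) (from_ : Int) (to_ : Int), Dom_moveCratesRec crates move from_ to_ → Pre_moveCratesRec crates move from_ to_ → Spec_moveCratesRec crates move from_ to_ (moveCratesRec crates move from_ to_)

-- ===== LEMMAS AND PROOFS =====

lemma pvIdx_lt {n : Nat} {i : Int} (h : PySem.Raise.InRange n i) : pvIdx n i < n := by
  obtain ⟨h1, h2⟩ := h
  unfold pvIdx
  split <;> omega

lemma pyIdx_eq {n : Nat} {i : Int} (h : PySem.Raise.InRange n i) :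
    PySem.List.pyIdx? n i = some (pvIdx n i) := by
  obtain ⟨h1, h2⟩ := h
  by_cases h0 : 0 ≤ i
  · simp only [PySem.List.pyIdx?, pvIdx, if_pos h0, if_pos h2]
  · simp only [PySem.List.pyIdx?, pvIdx, if_neg h0, if_pos h1]

lemma pyGetD_eq {α : Type} (xs : List α) (i : Int) (d : α) (h : PySem.Raise.InRange xs.length i) :
    PySem.List.pyGetD xs i d = xs.getD (pvIdx xs.length i) d := by
  simp [PySem.List.pyGetD, PySem.List.pyGet?, pyIdx_eq h, List.getD]

lemma pySetD_eq {α : Type} (xs : List α) (i : Int) (v : α) (h : PySem.Raise.InRange xs.length i) :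
    PySem.List.pySetD xs i v = xs.set (pvIdx xs.length i) v := by
  simp [PySem.List.pySetD, PySem.List.pySet?, pyIdx_eq h]

lemma pySetD_len_eq {α : Type} (xs : List α) (n : Nat) (i : Int) (v : α)
    (hlen : xs.length = n) (h : PySem.Raise.InRange n i) :
    PySem.List.pySetD xs i v = xs.set (pvIdx n i) v := by
  subst hlen; exact pySetD_eq xs i v h

lemma pyGetD_len_eq {α : Type} (xs : List α) (n : Nat) (i : Int) (d : α)
    (hlen : xs.length = n) (h : PySem.Raise.InRange n i) :
    PySem.List.pyGetD xs i d = xs.getD (pvIdx n i) d := by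
  subst hlen; exact pyGetD_eq xs i d h

lemma getD_set_self {α : Type} (l : List α) (i : Nat) (a d : α) (h : i < l.length) :
    (l.set i a).getD i d = a := by
  simp [List.getD, h]

lemma getD_set_ne {α : Type} (l : List α) {i j : Nat} (a d : α) (h : i ≠ j) :
    (l.set i a).getD j d = l.getD j d := by
  simp [List.getD, List.getElem?_set_ne h]

lemma set_getD_self {α : Type} (l : List α) (i : Nat) (d : α) (h : i < l.length) :
    l.set i (l.getD i d) = l := by
  rw [List.getD_eq_getElem l d h]
  exact List.set_getElem_self h

lemma set_comm' {α : Type} (l : List α) {i j : Nat} (a b : α) (h : i ≠ j) :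
    (l.set i a).set j b = (l.set j b).set i a := by
  apply List.ext_getElem (by simp)
  intro k h1 h2
  simp only [List.getElem_set]
  split_ifs <;> first | rfl | omega

lemma dropLast_concat_getLastD {α : Type} (l : List α) (d : α) (h : l ≠ []) :
    l.dropLast ++ [l.getLastD d] = l := by
  induction l generalizing d with
  | nil => exact absurd rfl h
  | cons a l ih =>
    cases l with
    | nil => rfl
    | cons b l' =>
      have hgl : (a :: b :: l').getLastD d = (b :: l').getLastD a := rfl
      have hdl : (a :: b :: l').dropLast = a :: (b :: l').dropLast := rfl
      rw [hgl, hdl, List.cons_append]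
      exact congrArg (a :: ·) (ih a (by simp))

-- the two stacks the loop touches, as a pure pair program: one bounce step of A per fuel unit
def goPair : List String × List String → Nat → List String × List String
  | st, 0 => st
  | (s, t), Nat.succ m =>
    if s.length = 0 then goPair ([t.getLastD ""], t.dropLast) m
    else goPair (s.dropLast, t ++ [s.getLastD ""]) m

-- B's closed form on the pair
def altPair (s t : List String) (m : Nat) : List String × List String :=
  if (m - min m s.length) % 2 = 1 then
    (s.take (s.length - min m s.length) ++
       [(t ++ (s.drop (s.length - min m s.length)).reverse).getLastD ""],
     (t ++ (s.drop (s.length - min m s.length)).reverse).dropLast)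
  else
    (s.take (s.length - min m s.length), t ++ (s.drop (s.length - min m s.length)).reverse)

lemma altPair_step (s t : List String) (m : Nat) (h : s ≠ []) :
    altPair s t (m + 1) = altPair s.dropLast (t ++ [s.getLastD ""]) m := by
  have hL : 1 ≤ s.length := List.length_pos_iff.mpr h
  have hlen : s.dropLast.length = s.length - 1 := by simp
  unfold altPair
  have hk : min m s.dropLast.length = min (m + 1) s.length - 1 := by omega
  rw [hk]
  have hk1 : 1 ≤ min (m + 1) s.length := by omega
  have hidx : s.dropLast.length - (min (m + 1) s.length - 1) = s.length - min (m + 1) s.length := by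
    omega
  rw [hidx]
  have hdecomp : s.drop (s.length - min (m + 1) s.length)
      = s.dropLast.drop (s.length - min (m + 1) s.length) ++ [s.getLastD ""] := by
    have hs2 := congrArg (fun l : List String => List.drop (s.length - min (m + 1) s.length) l)
      ((dropLast_concat_getLastD s "" h).symm)
    simp only at hs2
    rw [hs2, List.drop_append_of_le_length (by omega)]
  have htake : s.dropLast.take (s.length - min (m + 1) s.length)
      = s.take (s.length - min (m + 1) s.length) := by
    rw [List.dropLast_eq_take, List.take_take]
    congr 1
    omega
  have ht1 : t ++ [s.getLastD ""] ++ (s.dropLast.drop (s.length - min (m + 1) s.length)).reverse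
      = t ++ (s.drop (s.length - min (m + 1) s.length)).reverse := by
    rw [hdecomp, List.reverse_append, List.reverse_singleton, List.append_assoc]
  have hr : m - (min (m + 1) s.length - 1) = m + 1 - min (m + 1) s.length := by omega
  rw [htake, ht1, hr]

lemma goPair_eq_altPair : ∀ (m : Nat) (s t : List String), (m ≠ 0 → s ++ t ≠ []) →
    goPair (s, t) m = altPair s t m := by
  intro m
  induction m with
  | zero =>
    intro s t _
    simp [goPair, altPair]
  | succ m ih =>
    intro s t hne
    match s with
    | [] =>
      have ht : t ≠ [] := by simpa using hne (Nat.succ_ne_zero m)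
      have hstep : goPair (([] : List String), t) (m + 1)
          = goPair ([t.getLastD ""], t.dropLast) m := by
        simp [goPair]
      rw [hstep, ih _ _ (fun _ => by simp)]
      match m with
      | 0 =>
        simp [altPair]
      | Nat.succ m' =>
        unfold altPair
        rw [show min (m' + 1) ([t.getLastD ""] : List String).length = 1 from by simp]
        rw [show min (m' + 1 + 1) ([] : List String).length = 0 from by simp]
        simp only [List.length_singleton, List.length_nil, Nat.sub_zero, Nat.sub_self,
          List.take_zero, List.take_nil, List.drop_zero, List.drop_nil, List.reverse_nil,
          List.append_nil, List.reverse_singleton, List.nil_append]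
        rw [dropLast_concat_getLastD t "" ht]
        split_ifs with h1 h2 h3 <;> first | rfl | omega
    | a :: s' =>
      have hs : (a :: s') ≠ ([] : List String) := by simp
      have hstep : goPair ((a :: s'), t) (m + 1)
          = goPair ((a :: s').dropLast, t ++ [(a :: s').getLastD ""]) m := by
        simp [goPair]
      rw [hstep, ih _ _ (fun _ => by simp), altPair_step _ _ _ hs]

-- one unfolding of A's fuel recursion
lemma goCrates_succ (crates : List (List String)) (k : Nat) (from_ to_ : Int) :
    moveCratesRecGo crates (k + 1) from_ to_ =
      moveCratesRecGo
        (if (PySem.List.pyGetD crates from_ []).length = 0 then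
          PySem.List.pySetD (PySem.List.pySetD crates to_ (PySem.List.pyGetD crates to_ []).dropLast) from_
            (PySem.List.pyGetD (PySem.List.pySetD crates to_ (PySem.List.pyGetD crates to_ []).dropLast) from_ [] ++ [(PySem.List.pyGetD crates to_ []).getLastD ""])
         else
          PySem.List.pySetD (PySem.List.pySetD crates from_ (PySem.List.pyGetD crates from_ []).dropLast) to_
            (PySem.List.pyGetD (PySem.List.pySetD crates from_ (PySem.List.pyGetD crates from_ []).dropLast) to_ [] ++ [(PySem.List.pyGetD crates from_ []).getLastD ""]))
        k from_ to_ := by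
  rfl

lemma go_alias (c : List (List String)) (from_ to_ : Int)
    (hf : PySem.Raise.InRange c.length from_) (ht : PySem.Raise.InRange c.length to_)
    (heq : pvIdx c.length from_ = pvIdx c.length to_) :
    ∀ m : Nat, (m ≠ 0 → c.getD (pvIdx c.length from_) [] ≠ []) →
      moveCratesRecGo c m from_ to_ = c := by
  intro m
  induction m with
  | zero => intro _; rfl
  | succ m ih =>
    intro hs
    have hs' : c.getD (pvIdx c.length from_) [] ≠ [] := hs (Nat.succ_ne_zero m)
    have hpf : pvIdx c.length from_ < c.length := pvIdx_lt hf
    rw [goCrates_succ]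
    rw [pyGetD_eq c from_ [] hf]
    rw [if_neg (by simpa [List.length_eq_zero_iff] using hs')]
    rw [pySetD_eq c from_ _ hf]
    rw [pyGetD_len_eq _ c.length to_ [] (by simp) ht, pySetD_len_eq _ c.length to_ _ (by simp) ht]
    rw [← heq]
    rw [getD_set_self c _ _ _ hpf]
    rw [List.set_set]
    rw [dropLast_concat_getLastD _ "" hs']
    rw [set_getD_self c _ _ hpf]
    exact ih (fun _ => hs')

lemma go_lift (c : List (List String)) (from_ to_ : Int)
    (hf : PySem.Raise.InRange c.length from_) (ht : PySem.Raise.InRange c.length to_)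
    (hne : pvIdx c.length from_ ≠ pvIdx c.length to_) :
    ∀ (m : Nat) (s t : List String),
      moveCratesRecGo ((c.set (pvIdx c.length from_) s).set (pvIdx c.length to_) t) m from_ to_
        = (c.set (pvIdx c.length from_) (goPair (s, t) m).1).set (pvIdx c.length to_) (goPair (s, t) m).2 := by
  have hpf : pvIdx c.length from_ < c.length := pvIdx_lt hf
  have hpt : pvIdx c.length to_ < c.length := pvIdx_lt ht
  intro m
  induction m with
  | zero => intro s t; rfl
  | succ m ih =>
    intro s t
    set pf := pvIdx c.length from_ with hpfdef
    set pt := pvIdx c.length to_ with hptdef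
    have hgf : PySem.List.pyGetD ((c.set pf s).set pt t) from_ ([] : List String) = s := by
      rw [pyGetD_len_eq _ c.length from_ [] (by simp) hf, ← hpfdef]
      rw [getD_set_ne _ _ _ (Ne.symm hne), getD_set_self _ _ _ _ hpf]
    have hgt : PySem.List.pyGetD ((c.set pf s).set pt t) to_ ([] : List String) = t := by
      rw [pyGetD_len_eq _ c.length to_ [] (by simp) ht, ← hptdef]
      rw [getD_set_self _ _ _ _ (by simpa using hpt)]
    rw [goCrates_succ, hgf, hgt]
    by_cases hsz : s.length = 0
    · rw [if_pos hsz]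
      have hsnil : s = [] := List.length_eq_zero_iff.mp hsz
      rw [pySetD_len_eq _ c.length to_ _ (by simp) ht, ← hptdef, List.set_set]
      rw [pyGetD_len_eq _ c.length from_ [] (by simp) hf, ← hpfdef]
      rw [pySetD_len_eq _ c.length from_ _ (by simp) hf, ← hpfdef]
      rw [getD_set_ne _ _ _ (Ne.symm hne), getD_set_self _ _ _ _ hpf]
      rw [set_comm' _ _ _ (Ne.symm hne), List.set_set]
      rw [hsnil, List.nil_append]
      rw [ih ([t.getLastD ""]) t.dropLast]
      have hgp : goPair (([] : List String), t) (m + 1) = goPair ([t.getLastD ""], t.dropLast) m := by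
        simp [goPair]
      rw [hgp]
    · rw [if_neg hsz]
      have hsne : s ≠ [] := fun hc => hsz (by simp [hc])
      rw [pySetD_len_eq _ c.length from_ _ (by simp) hf, ← hpfdef]
      rw [set_comm' _ _ _ (Ne.symm hne), List.set_set]
      rw [pyGetD_len_eq _ c.length to_ [] (by simp) ht, ← hptdef]
      rw [pySetD_len_eq _ c.length to_ _ (by simp) ht, ← hptdef]
      rw [getD_set_self _ _ _ _ (by simpa using hpt)]
      rw [List.set_set]
      rw [ih s.dropLast (t ++ [s.getLastD ""])]
      have hgp : goPair (s, t) (m + 1) = goPair (s.dropLast, t ++ [s.getLastD ""]) m := by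
        match s, hsne with
        | a :: s', _ => simp [goPair]
      rw [hgp]

lemma alt_closed (c : List (List String)) (move from_ to_ : Int)
    (hf : PySem.Raise.InRange c.length from_) (ht : PySem.Raise.InRange c.length to_)
    (hne : pvIdx c.length from_ ≠ pvIdx c.length to_) (hm : 0 ≤ move) :
    moveCratesRec_alt c move from_ to_
      = (c.set (pvIdx c.length from_)
          (altPair (c.getD (pvIdx c.length from_) []) (c.getD (pvIdx c.length to_) []) move.toNat).1).set
        (pvIdx c.length to_)
          (altPair (c.getD (pvIdx c.length from_) []) (c.getD (pvIdx c.length to_) []) move.toNat).2 := by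
  set pf := pvIdx c.length from_ with hpfdef
  set pt := pvIdx c.length to_ with hptdef
  have hpf : pf < c.length := pvIdx_lt hf
  have hpt : pt < c.length := pvIdx_lt ht
  set s := c.getD pf ([] : List String) with hsdef
  set t := c.getD pt ([] : List String) with htdef
  set m := move.toNat with hmdef
  set kN := min m s.length with hkdef
  simp only [moveCratesRec_alt]
  rw [if_pos hne]
  rw [pyGetD_eq c from_ [] hf, pyGetD_eq c to_ [] ht, ← hpfdef, ← hptdef, ← hsdef, ← htdef]
  have hmove : move = (m : Int) := by omega
  have hkN : min move ((s.length : Nat) : Int) = ((kN : Nat) : Int) := by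
    rw [hmove, hkdef]; push_cast; rfl
  have hsub : ((s.length : Nat) : Int) - ((kN : Nat) : Int) = ((s.length - kN : Nat) : Int) := by
    have : kN ≤ s.length := by omega
    omega
  rw [hkN, hsub]
  rw [PySem.List.slice_from_natCast, PySem.List.slice_to_natCast]
  have hmod : PySem.Int.mod (move - ((kN : Nat) : Int)) 2 = (((m - kN) % 2 : Nat) : Int) := by
    rw [PySem.Int.mod_eq_emod_of_pos (by norm_num)]
    rw [hmove]
    have hcast : (m : Int) - (kN : Int) = ((m - kN : Nat) : Int) := by omega
    rw [hcast]
    omega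
  rw [hmod]
  rw [pySetD_eq c to_ _ ht, ← hptdef]
  unfold altPair
  rw [← hkdef]
  by_cases hpar : (m - kN) % 2 = 1
  · rw [if_pos hpar, if_pos (show (((m - kN) % 2 : Nat) : Int) = 1 by exact_mod_cast hpar)]
    rw [pySetD_len_eq _ c.length from_ _ (by simp [pysem]) hf, ← hpfdef]
    rw [pySetD_len_eq _ c.length to_ _ (by simp [pysem]) ht, ← hptdef]
    rw [pySetD_len_eq _ c.length from_ _ (by simp) hf, ← hpfdef]
    apply List.ext_getElem (by simp)
    intro kk hk1 hk2
    simp only [List.getElem_set]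
    split_ifs <;> first | rfl | omega
  · rw [if_neg hpar, if_neg (show ¬ (((m - kN) % 2 : Nat) : Int) = 1 by
      intro hc; exact hpar (by exact_mod_cast hc))]
    rw [pySetD_len_eq _ c.length from_ _ (by simp) hf, ← hpfdef]
    apply List.ext_getElem (by simp)
    intro kk hk1 hk2
    simp only [List.getElem_set]
    split_ifs <;> first | rfl | omega

-- ===== VERDICT (by name: the statement is the Claim_ definition above) =====
theorem moveCratesRec_spec : Claim_equal_moveCratesRec := by
  intro crates move from_ to_ _hdom hpre
  obtain ⟨hf, ht, hm0, hstk⟩ := hpre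
  unfold Spec_moveCratesRec moveCratesRec
  by_cases heq : pvIdx crates.length from_ = pvIdx crates.length to_
  · -- aliased stacks: A bounces the same crate in place, B returns crates unchanged
    rw [go_alias crates from_ to_ hf ht heq move.toNat (by
      intro hmz
      have hmpos : 0 < move := by omega
      have hx := hstk hmpos
      rw [if_pos heq] at hx
      rw [pyGetD_eq crates from_ [] hf] at hx
      exact hx)]
    simp only [moveCratesRec_alt]
    rw [if_neg (fun hn => hn heq)]
  · have hcond : move.toNat ≠ 0 →
        (crates.getD (pvIdx crates.length from_) []) ++ (crates.getD (pvIdx crates.length to_) []) ≠ [] := by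
      intro hmz
      have hmpos : 0 < move := by omega
      have h2 := hstk hmpos
      rw [if_neg heq] at h2
      rw [pyGetD_eq crates from_ [] hf, pyGetD_eq crates to_ [] ht] at h2
      intro hc
      rw [List.append_eq_nil_iff] at hc
      rcases h2 with h2 | h2
      · exact h2 hc.1
      · exact h2 hc.2
    have hself : (crates.set (pvIdx crates.length from_) (crates.getD (pvIdx crates.length from_) [])).set
        (pvIdx crates.length to_) (crates.getD (pvIdx crates.length to_) []) = crates := by
      rw [set_getD_self _ _ _ (pvIdx_lt hf)]
      rw [set_getD_self _ _ _ (pvIdx_lt ht)]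
    calc moveCratesRecGo crates move.toNat from_ to_
        = moveCratesRecGo ((crates.set (pvIdx crates.length from_) (crates.getD (pvIdx crates.length from_) [])).set
            (pvIdx crates.length to_) (crates.getD (pvIdx crates.length to_) [])) move.toNat from_ to_ := by rw [hself]
      _ = (crates.set (pvIdx crates.length from_)
            (goPair (crates.getD (pvIdx crates.length from_) [], crates.getD (pvIdx crates.length to_) []) move.toNat).1).set
            (pvIdx crates.length to_)
            (goPair (crates.getD (pvIdx crates.length from_) [], crates.getD (pvIdx crates.length to_) []) move.toNat).2 :=
          go_lift crates from_ to_ hf ht heq move.toNat _ _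
      _ = moveCratesRec_alt crates move from_ to_ := by
          rw [goPair_eq_altPair move.toNat _ _ hcond]
          rw [alt_closed crates move from_ to_ hf ht heq hm0]
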